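-- pv_equiv track=rewrite | github.com/sfkleach/AdventOfCode2024 | day01/day01.py | create_lists_from_input
-- ===== SOURCE A (Python) =====
-- def create_lists_from_input(data):
--     list1 = []
--     list2 = []
--
--     # splitting into two operations. return characters then spaces before sorting into lists.
--     for line in data:
--         parts = line.split()
--
--         list1.append(parts[0])
--         list2.append(parts[1])
--
--     return (list1, list2)
-- ===== SOURCE B (Python) =====
-- def create_lists_from_input(data):
--     rows = [line.split() for line in data]
--     if not rows:
--         return ([], [])
--     cols = list(zip(*rows))
--     return (list(cols[0]), list(cols[1]))
-- ===== Notes on version B (the rewrite author's own statement) =====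
-- stated objective: idiomatic
-- what changed: Replaces the interleaved append-to-two-lists loop by materializing all split rows and transposing with zip(*rows), taking the first two columns.
import Mathlib
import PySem

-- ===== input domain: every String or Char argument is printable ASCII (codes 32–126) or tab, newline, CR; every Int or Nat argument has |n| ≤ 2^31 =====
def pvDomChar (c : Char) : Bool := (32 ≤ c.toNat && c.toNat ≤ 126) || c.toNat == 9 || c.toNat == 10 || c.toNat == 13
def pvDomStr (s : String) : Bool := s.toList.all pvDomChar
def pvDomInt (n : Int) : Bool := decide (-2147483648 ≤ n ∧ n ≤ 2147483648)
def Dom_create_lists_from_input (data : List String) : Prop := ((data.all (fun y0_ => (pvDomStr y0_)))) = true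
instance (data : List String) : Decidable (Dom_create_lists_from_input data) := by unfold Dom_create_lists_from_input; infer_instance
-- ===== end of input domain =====

-- B transposes the materialized split rows instead of A's interleaved two-append loop (idiomatic decomposition).

-- ===== PORT A =====
-- loop appending parts[0] / parts[1] per line; pyGet? … .getD "" stands for parts[i] (none = IndexError, excluded by Pre_)
def create_lists_from_input (data : List String) : List String × List String :=
  data.foldl
    (fun acc line =>
      let parts := PySem.Str.split₀ line
      (acc.1 ++ [(PySem.List.pyGet? parts 0).getD ""],
       acc.2 ++ [(PySem.List.pyGet? parts 1).getD ""]))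
    ([], [])

-- ===== PORT B =====
-- rows = [line.split() for line in data]; zip(*rows) = one column per index below the minimal row length;
-- cols[0]/cols[1] via pyGet? … .getD [] (none = IndexError, excluded by Pre_)
def create_lists_from_input_alt (data : List String) : List String × List String :=
  let rows := data.map PySem.Str.split₀
  match rows with
  | [] => ([], [])
  | r0 :: rest =>
    let m := rest.foldl (fun m r => min m r.length) r0.length
    let cols := (List.range m).map (fun i => (r0 :: rest).map (fun r => r.getD i ""))
    ((PySem.List.pyGet? cols 0).getD [], (PySem.List.pyGet? cols 1).getD [])

-- ===== PRECONDITION & SPEC =====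
-- Pre_ excludes exactly the inputs on which A raises IndexError: a line splitting into fewer than two tokens.
def Pre_create_lists_from_input (data : List String) : Prop :=
  ∀ line ∈ data, 2 ≤ (PySem.Str.split₀ line).length
instance (data : List String) : Decidable (Pre_create_lists_from_input data) := by
  unfold Pre_create_lists_from_input; infer_instance

def pvWitness_create_lists_from_input : List String := ["1 2", "30  40"]

def Spec_create_lists_from_input (data : List String) (out : List String × List String) : Prop := out = create_lists_from_input_alt data
instance (data : List String) (out : List String × List String) : Decidable (Spec_create_lists_from_input data out) := by unfold Spec_create_lists_from_input; infer_instance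

-- ===== CLAIM (what is proved, stated in full; the proofs are below) =====
def Claim_equal_create_lists_from_input : Prop := ∀ (data : List String), Dom_create_lists_from_input data → Pre_create_lists_from_input data → Spec_create_lists_from_input data (create_lists_from_input data)

-- ===== LEMMAS AND PROOFS =====

def pvFst (line : String) : String := (PySem.List.pyGet? (PySem.Str.split₀ line) 0).getD ""
def pvSnd (line : String) : String := (PySem.List.pyGet? (PySem.Str.split₀ line) 1).getD ""

lemma foldA (data : List String) (acc : List String × List String) :
    data.foldl
      (fun acc line =>
        let parts := PySem.Str.split₀ line
        (acc.1 ++ [(PySem.List.pyGet? parts 0).getD ""],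
         acc.2 ++ [(PySem.List.pyGet? parts 1).getD ""]))
      acc
    = (acc.1 ++ data.map pvFst, acc.2 ++ data.map pvSnd) := by
  induction data generalizing acc with
  | nil => simp
  | cons x xs ih => simp [List.foldl, ih, pvFst, pvSnd]

lemma le_minLen (r0 : List String) (rest : List (List String)) (k : Nat)
    (h : ∀ r ∈ r0 :: rest, k ≤ r.length) :
    k ≤ rest.foldl (fun m r => min m r.length) r0.length := by
  induction rest generalizing r0 with
  | nil => simpa using h r0 (by simp)
  | cons y ys ih =>
    simp only [List.foldl]
    by_cases hle : r0.length ≤ y.length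
    · rw [show min r0.length y.length = r0.length by omega]
      exact ih r0 (by intro r hr; apply h; rcases hr with h0 | h1 <;> (simp [*]; try tauto))
    · rw [show min r0.length y.length = y.length by omega]
      exact ih y (by intro r hr; apply h; rcases hr with h0 | h1 <;> (simp [*]; try tauto))

lemma pyGet?_map_range {α : Type} (f : Nat → α) (m j : Nat) (h : j < m) :
    PySem.List.pyGet? ((List.range m).map f) (j : Int) = some (f j) := by
  simp [h]

lemma getD_pv0 (r : List String) (h : 2 ≤ r.length) :
    (PySem.List.pyGet? r 0).getD "" = r.getD 0 "" := by
  match r, h with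
  | a :: b :: t, _ =>
    simp [PySem.List.pyGet?, PySem.List.pyIdx?,
      show ((0:Int) ≤ (t.length:Int) + 1) from by omega]

lemma getD_pv1 (r : List String) (h : 2 ≤ r.length) :
    (PySem.List.pyGet? r 1).getD "" = r.getD 1 "" := by
  match r, h with
  | a :: b :: t, _ =>
    simp [PySem.List.pyGet?, PySem.List.pyIdx?]

-- ===== VERDICT (by name: the statement is the Claim_ definition above) =====
theorem create_lists_from_input_spec : Claim_equal_create_lists_from_input := by
  intro data _ hpre
  unfold Spec_create_lists_from_input create_lists_from_input create_lists_from_input_alt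
  rw [foldA]
  cases data with
  | nil => simp
  | cons l ls =>
    simp only [List.map_cons, List.nil_append]
    have hall : ∀ r ∈ PySem.Str.split₀ l :: ls.map PySem.Str.split₀, 2 ≤ r.length := by
      intro r hr
      rcases List.mem_cons.mp hr with h0 | h1
      · exact h0 ▸ hpre l (by simp)
      · obtain ⟨x, hx, rfl⟩ := List.mem_map.mp h1
        exact hpre x (by simp [hx])
    have hm : 2 ≤ (ls.map PySem.Str.split₀).foldl (fun m r => min m r.length)
        (PySem.Str.split₀ l).length := le_minLen _ _ 2 hall
    have h0 := pyGet?_map_range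
      (fun i => (PySem.Str.split₀ l).getD i "" :: ls.map ((fun r => r.getD i "") ∘ PySem.Str.split₀))
      ((ls.map PySem.Str.split₀).foldl (fun m r => min m r.length) (PySem.Str.split₀ l).length) 0
      (by omega)
    have h1 := pyGet?_map_range
      (fun i => (PySem.Str.split₀ l).getD i "" :: ls.map ((fun r => r.getD i "") ∘ PySem.Str.split₀))
      ((ls.map PySem.Str.split₀).foldl (fun m r => min m r.length) (PySem.Str.split₀ l).length) 1
      (by omega)
    simp only [Nat.cast_zero, Nat.cast_one] at h0 h1
    simp only [List.map_map, h0, h1, Option.getD_some, Prod.mk.injEq]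
    constructor
    · congr 1
      · simp only [pvFst]
        exact getD_pv0 _ (hall _ (by simp))
      · apply List.map_congr_left
        intro x hx
        simp only [pvFst, Function.comp]
        exact getD_pv0 _ (hall _ (List.mem_cons_of_mem _ (List.mem_map_of_mem hx)))
    · congr 1
      · simp only [pvSnd]
        exact getD_pv1 _ (hall _ (by simp))
      · apply List.map_congr_left
        intro x hx
        simp only [pvSnd, Function.comp]
        exact getD_pv1 _ (hall _ (List.mem_cons_of_mem _ (List.mem_map_of_mem hx)))
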